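-- pv_equiv track=rewrite | github.com/Superaitor/Finalized-CK12-project-1 | word2vec.py | topic_sorter
-- ===== SOURCE A (Python) =====
-- def topic_sorter(topics):  # Extracts the LDA topics into a list
--     splitter = ""
--     ind = 0
--     tops = []
--     separate_words = ""
--     odds = 0
--     indexes = []
--     x = 0
--     i = 0
--     for word in topics:
--         splitter += str(word[1])
--     while x < 3:
--         if splitter[ind] is '"':
--             odds += 1
--             if odds % 2 == 1:
--                 indexes.append(ind)
--                 x += 1
--         ind += 1
--     while i < 3:
--         for let in splitter[indexes[i] + 1:]:
--             if let != '"':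
--                 separate_words += let
--             else:
--                 break
--         tops.append(separate_words)
--         i += 1
--         separate_words = ""
--
--     return tops
-- ===== SOURCE B (Python) =====
-- def topic_sorter(topics):  # Extracts the LDA topics into a list
--     splitter = ""
--     for word in topics:
--         splitter += str(word[1])
--     parts = splitter.split('"')
--     return [parts[1], parts[3], parts[5]]
-- ===== Notes on version B (the rewrite author's own statement) =====
-- stated objective: idiomatic
-- what changed: Replaced the manual quote-scanning while-loop (index table) and the per-word character-copy loops with a single str.split('"') and picking the odd-indexed parts 1, 3, 5.
import Mathlib
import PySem

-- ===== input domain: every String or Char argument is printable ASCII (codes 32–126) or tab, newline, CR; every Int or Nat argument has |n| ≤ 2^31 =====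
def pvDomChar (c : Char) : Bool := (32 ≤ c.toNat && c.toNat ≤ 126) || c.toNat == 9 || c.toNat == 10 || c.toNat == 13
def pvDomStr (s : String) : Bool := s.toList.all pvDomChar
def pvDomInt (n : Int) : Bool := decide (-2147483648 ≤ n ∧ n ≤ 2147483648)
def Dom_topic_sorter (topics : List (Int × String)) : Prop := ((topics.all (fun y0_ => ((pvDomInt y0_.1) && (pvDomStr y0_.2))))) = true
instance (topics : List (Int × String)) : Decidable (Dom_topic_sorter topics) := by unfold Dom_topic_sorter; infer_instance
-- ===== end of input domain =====

-- B replaces A's quote-scanning index table and char-copy loops with one split('"'); return-value equivalence (idiomatic, not faster).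

-- ===== PORT A =====
-- the first while loop: scan characters, recording the index of every odd-numbered '"' until three are found;
-- an empty list before x reaches 3 is where Python raises IndexError (excluded by Pre_)
def pvScanA (cs : List Char) (ind odds x : Nat) : List Nat :=
  match cs with
  | [] => []
  | c :: rest =>
    if x < 3 then
      if c = '"' then
        if (odds + 1) % 2 = 1 then ind :: pvScanA rest (ind + 1) (odds + 1) (x + 1)
        else pvScanA rest (ind + 1) (odds + 1) x
      else pvScanA rest (ind + 1) odds x
    else []

-- the inner 'for let in …: if let != '"': separate_words += let else break' loop (string accumulation as char collection)
def pvCollectA (cs : List Char) : List Char :=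
  match cs with
  | [] => []
  | c :: rest => if c ≠ '"' then c :: pvCollectA rest else []

def topic_sorter (topics : List (Int × String)) : List String :=
  let splitter := topics.foldl (fun s w => s ++ w.2) ""   -- str(word[1]) on a str is word[1]
  let cs := splitter.toList
  match pvScanA cs 0 0 0 with
  | [i0, i1, i2] =>
      [String.ofList (pvCollectA (cs.drop (i0 + 1))),
       String.ofList (pvCollectA (cs.drop (i1 + 1))),
       String.ofList (pvCollectA (cs.drop (i2 + 1)))]
  | _ => []   -- fewer than three opening quotes: Python raised IndexError in the first loop (outside Pre_)

-- ===== PORT B =====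
def topic_sorter_alt (topics : List (Int × String)) : List String :=
  let splitter := topics.foldl (fun s w => s ++ w.2) ""
  let parts := (PySem.Str.split? splitter "\"").getD []   -- some: the separator is nonempty
  [(PySem.List.pyGet? parts 1).getD "",                   -- parts[1] … parts[5]; none = IndexError, outside Pre_
   (PySem.List.pyGet? parts 3).getD "",
   (PySem.List.pyGet? parts 5).getD ""]

-- ===== PRECONDITION & SPEC =====
-- Pre_ excludes exactly the inputs where the concatenated string holds fewer than five '"' characters:
-- there A (and B) raise IndexError instead of returning.
def Pre_topic_sorter (topics : List (Int × String)) : Prop :=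
  5 ≤ ((topics.map (fun w => w.2.toList.count '"')).sum)
instance (topics : List (Int × String)) : Decidable (Pre_topic_sorter topics) := by
  unfold Pre_topic_sorter; infer_instance

def pvWitness_topic_sorter : (List (Int × String)) := [(0, "\"alpha\" \"beta\" \"gamma\"")]

def Spec_topic_sorter (topics : List (Int × String)) (out : List String) : Prop := out = topic_sorter_alt topics
instance (topics : List (Int × String)) (out : List String) : Decidable (Spec_topic_sorter topics out) := by unfold Spec_topic_sorter; infer_instance

-- ===== CLAIM (what is proved, stated in full; the proofs are below) =====
def Claim_equal_topic_sorter : Prop := ∀ (topics : List (Int × String)), Dom_topic_sorter topics → Pre_topic_sorter topics → Spec_topic_sorter topics (topic_sorter topics)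

-- ===== LEMMAS AND PROOFS =====

-- the concatenation loop flattens the strings
theorem pvFoldToList (topics : List (Int × String)) (s0 : String) :
    (topics.foldl (fun s w => s ++ w.2) s0).toList
      = s0.toList ++ (topics.map (fun w => w.2.toList)).flatten := by
  induction topics generalizing s0 with
  | nil => simp
  | cons w ws ih => simp [ih, String.toList_append]

-- splitting off the first occurrence of q
theorem pvExistsSplit (q : Char) (l : List Char) (h : 0 < l.count q) :
    ∃ s t, l = s ++ q :: t ∧ q ∉ s ∧ l.count q = t.count q + 1 := by
  induction l with
  | nil => simp at h
  | cons c rest ih =>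
    by_cases hc : c = q
    · exact ⟨[], rest, by simp [hc], by simp, by simp [hc]⟩
    · have h' : 0 < rest.count q := by
        simpa [List.count_cons, hc] using h
      obtain ⟨s, t, he, hn, hcnt⟩ := ih h'
      exact ⟨c :: s, t, by simp [he], by simp [hn, Ne.symm, hc], by
        simp [hc, hcnt]⟩

-- pvScanA skips a quote-free prefix, only advancing the index
theorem pvScanA_skip (s l : List Char) (ind odds x : Nat) (h : '"' ∉ s) :
    pvScanA (s ++ l) ind odds x = pvScanA l (ind + s.length) odds x := by
  induction s generalizing ind with
  | nil => simp
  | cons c s' ih =>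
    have hc : c ≠ '"' := fun hh => h (hh ▸ List.mem_cons_self)
    by_cases hx : x < 3
    · rw [List.cons_append]
      simp only [pvScanA, if_pos hx, if_neg hc]
      rw [ih (ind + 1) (fun hh => h (List.mem_cons_of_mem _ hh))]
      congr 1
      simp; omega
    · cases l with
      | nil => simp [pvScanA, hx]
      | cons d l' => simp [pvScanA, hx]

theorem pvScanA_done (l : List Char) (ind odds : Nat) : pvScanA l ind odds 3 = [] := by
  cases l <;> simp [pvScanA]

-- pvCollectA stops at the first quote
theorem pvCollectA_prefix (s t : List Char) (h : '"' ∉ s) :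
    pvCollectA (s ++ '"' :: t) = s := by
  induction s with
  | nil => simp [pvCollectA]
  | cons c s' ih =>
    have hc : c ≠ '"' := fun hh => h (hh ▸ List.mem_cons_self)
    simp only [List.cons_append, pvCollectA, if_pos hc]
    rw [ih (fun hh => h (List.mem_cons_of_mem _ hh))]

-- dropping past a marked position
theorem pvDropDecomp (s t : List Char) (c : Char) (n m : Nat) (h : n = s.length + 1 + m) :
    (s ++ c :: t).drop n = t.drop m := by
  subst h
  induction s with
  | nil =>
    have h1 : ([] : List Char).length + 1 + m = m + 1 := by simp; omega
    rw [List.nil_append, h1, List.drop_succ_cons]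
  | cons d s' ih =>
    have h1 : (d :: s').length + 1 + m = (s'.length + 1 + m) + 1 := by simp; omega
    rw [List.cons_append, h1, List.drop_succ_cons]
    exact ih

-- the PySem fuel-based splitter computes List.splitOn (single-character separator)
theorem pvGoEq (q : Char) (fuel : Nat) :
    ∀ (l cur : List Char) (acc : List (List Char)), l.length < fuel →
      PySem.Chars.splitOn.go [q] fuel l cur acc
        = acc.reverse ++ (l.splitOn q).modifyHead (fun h => cur.reverse ++ h) := by
  induction fuel with
  | zero => intro l cur acc h; omega
  | succ n ih =>
    intro l cur acc h
    cases l with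
    | nil => simp [PySem.Chars.splitOn.go, List.splitOn, List.splitOnP_nil]
    | cons c rest =>
      by_cases hc : c = q
      · subst hc
        have hp : List.isPrefixOf [c] (c :: rest) = true := by simp [List.isPrefixOf]
        rw [PySem.Chars.splitOn.go, if_pos hp]
        rw [ih _ _ _ (by simpa using Nat.lt_of_succ_lt_succ h)]
        simp only [List.splitOn, List.splitOnP_cons, beq_self_eq_true, if_pos]
        cases hrs : List.splitOnP (fun x => x == c) rest with
        | nil => simp [hrs]
        | cons hd tl => simp [hrs]
      · have hp : List.isPrefixOf [q] (c :: rest) = true → False := by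
          simp [List.isPrefixOf]; intro hh; exact hc hh.symm
        rw [PySem.Chars.splitOn.go, if_neg (by simpa using hp)]
        rw [ih _ _ _ (by simpa using Nat.lt_of_succ_lt_succ h)]
        have hne : ∃ hd tl, rest.splitOn q = hd :: tl := by
          cases hrs : rest.splitOn q with
          | nil =>
            exfalso
            have := List.splitOnP_ne_nil (fun x => x == q) rest
            simp [List.splitOn] at hrs
            exact this hrs
          | cons hd tl => exact ⟨hd, tl, rfl⟩
        obtain ⟨hd, tl, hrs⟩ := hne
        simp [List.splitOn, List.splitOnP_cons, hc] at hrs ⊢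
        simp [hrs]

theorem pvSplitOnEq (cs : List Char) :
    PySem.Chars.splitOn cs ['"'] = cs.splitOn '"' := by
  rw [PySem.Chars.splitOn, pvGoEq '"' (cs.length + 1) cs [] [] (by omega)]
  cases hcs : cs.splitOn '"' with
  | nil =>
    exfalso
    have := List.splitOnP_ne_nil (fun x => x == '"') cs
    simp [List.splitOn] at hcs
    exact this hcs
  | cons hd tl => simp

-- splitOn peels off a quote-free prefix
theorem pvSplitOnAppend (s t : List Char) (h : '"' ∉ s) :
    (s ++ '"' :: t).splitOn '"' = s :: t.splitOn '"' := by
  induction s with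
  | nil => simp [List.splitOn, List.splitOnP_cons]
  | cons c s' ih =>
    have hc : c ≠ '"' := fun hh => h (hh ▸ List.mem_cons_self)
    have := ih (fun hh => h (List.mem_cons_of_mem _ hh))
    simp [List.splitOn, List.splitOnP_cons, hc] at this ⊢
    simp [this]

-- the head of splitOn is what pvCollectA extracts
theorem pvSplitOnHead (r : List Char) :
    ∃ t', r.splitOn '"' = pvCollectA r :: t' := by
  induction r with
  | nil => exact ⟨[], by simp [List.splitOn, List.splitOnP_nil, pvCollectA]⟩
  | cons c rest ih =>
    obtain ⟨t', ht⟩ := ih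
    by_cases hc : c = '"'
    · exact ⟨rest.splitOn '"', by simp [List.splitOn, List.splitOnP_cons, hc, pvCollectA]⟩
    · refine ⟨t', ?_⟩
      simp [List.splitOn, List.splitOnP_cons, hc, pvCollectA] at ht ⊢
      simp [ht]

theorem pvScanA_open (t : List Char) (ind odds x : Nat) (ho : odds % 2 = 0) (hx : x < 3) :
    pvScanA ('"' :: t) ind odds x = ind :: pvScanA t (ind + 1) (odds + 1) (x + 1) := by
  have h1 : (odds + 1) % 2 = 1 := by omega
  simp [pvScanA, hx, h1]

theorem pvScanA_close (t : List Char) (ind odds x : Nat) (ho : odds % 2 = 1) (hx : x < 3) :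
    pvScanA ('"' :: t) ind odds x = pvScanA t (ind + 1) (odds + 1) x := by
  have h1 : ¬ (odds + 1) % 2 = 1 := by omega
  simp [pvScanA, hx, h1]

theorem topic_sorter_spec : Claim_equal_topic_sorter := by
  intro topics _ hpre
  unfold Spec_topic_sorter topic_sorter topic_sorter_alt
  set splitter := topics.foldl (fun s w => s ++ w.2) "" with hsp
  set cs := splitter.toList with hcs
  have hcount : 5 ≤ cs.count '"' := by
    have h1 := pvFoldToList topics ""
    rw [hcs, hsp, h1]
    simpa [List.count_flatten, Function.comp] using hpre
  -- decompose cs around its first five quotes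
  obtain ⟨s0, t1, he0, hn0, hc0⟩ := pvExistsSplit '"' cs (by omega)
  obtain ⟨s1, t2, he1, hn1, hc1⟩ := pvExistsSplit '"' t1 (by omega)
  obtain ⟨s2, t3, he2, hn2, hc2⟩ := pvExistsSplit '"' t2 (by omega)
  obtain ⟨s3, t4, he3, hn3, hc3⟩ := pvExistsSplit '"' t3 (by omega)
  obtain ⟨s4, r, he4, hn4, hc4⟩ := pvExistsSplit '"' t4 (by omega)
  have hscan : pvScanA cs 0 0 0
      = [0 + s0.length,
         0 + s0.length + 1 + s1.length + 1 + s2.length,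
         0 + s0.length + 1 + s1.length + 1 + s2.length + 1 + s3.length + 1 + s4.length] := by
    rw [he0, pvScanA_skip s0 _ 0 0 0 hn0,
        pvScanA_open _ _ _ _ (by norm_num) (by norm_num),
        he1, pvScanA_skip s1 _ _ 1 1 hn1,
        pvScanA_close _ _ _ _ (by norm_num) (by norm_num),
        he2, pvScanA_skip s2 _ _ 2 1 hn2,
        pvScanA_open _ _ _ _ (by norm_num) (by norm_num),
        he3, pvScanA_skip s3 _ _ 3 2 hn3,
        pvScanA_close _ _ _ _ (by norm_num) (by norm_num),
        he4, pvScanA_skip s4 _ _ 4 2 hn4,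
        pvScanA_open _ _ _ _ (by norm_num) (by norm_num),
        pvScanA_done]
  have hd0 : cs.drop (0 + s0.length + 1) = t1 := by
    rw [he0, pvDropDecomp s0 t1 '"' _ 0 (by omega)]; simp
  have hd1 : cs.drop (0 + s0.length + 1 + s1.length + 1 + s2.length + 1) = t3 := by
    rw [he0, pvDropDecomp s0 _ '"' _ (s1.length + 1 + s2.length + 1) (by omega),
        he1, pvDropDecomp s1 _ '"' _ (s2.length + 1) (by omega),
        he2, pvDropDecomp s2 _ '"' _ 0 (by omega)]
    simp
  have hd2 : cs.drop (0 + s0.length + 1 + s1.length + 1 + s2.length + 1 + s3.length + 1 + s4.length + 1) = r := by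
    rw [he0, pvDropDecomp s0 _ '"' _ (s1.length + 1 + s2.length + 1 + s3.length + 1 + s4.length + 1) (by omega),
        he1, pvDropDecomp s1 _ '"' _ (s2.length + 1 + s3.length + 1 + s4.length + 1) (by omega),
        he2, pvDropDecomp s2 _ '"' _ (s3.length + 1 + s4.length + 1) (by omega),
        he3, pvDropDecomp s3 _ '"' _ (s4.length + 1) (by omega),
        he4, pvDropDecomp s4 _ '"' _ 0 (by omega)]
    simp
  obtain ⟨t', ht'⟩ := pvSplitOnHead r
  have hsplit : cs.splitOn '"' = s0 :: s1 :: s2 :: s3 :: s4 :: pvCollectA r :: t' := by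
    rw [he0, pvSplitOnAppend _ _ hn0, he1, pvSplitOnAppend _ _ hn1,
        he2, pvSplitOnAppend _ _ hn2, he3, pvSplitOnAppend _ _ hn3,
        he4, pvSplitOnAppend _ _ hn4, ht']
  have hparts : (PySem.Str.split? splitter "\"").getD []
      = [String.ofList s0, String.ofList s1, String.ofList s2, String.ofList s3,
         String.ofList s4, String.ofList (pvCollectA r)] ++ t'.map String.ofList := by
    rw [PySem.Str.split?]
    have hq : ("\"" : String).toList = ['"'] := by decide
    rw [hq, PySem.Chars.split?]
    simp only [List.isEmpty_cons, if_neg Bool.false_ne_true, Option.map_some, Option.getD_some]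
    rw [← hcs, pvSplitOnEq, hsplit]
    simp
  show (match pvScanA cs 0 0 0 with
        | [i0, i1, i2] =>
            [String.ofList (pvCollectA (cs.drop (i0 + 1))),
             String.ofList (pvCollectA (cs.drop (i1 + 1))),
             String.ofList (pvCollectA (cs.drop (i2 + 1)))]
        | _ => [])
      = [(PySem.List.pyGet? ((PySem.Str.split? splitter "\"").getD []) 1).getD "",
         (PySem.List.pyGet? ((PySem.Str.split? splitter "\"").getD []) 3).getD "",
         (PySem.List.pyGet? ((PySem.Str.split? splitter "\"").getD []) 5).getD ""]
  rw [hscan]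
  simp only [hparts]
  rw [hd0, hd1, hd2, he1, pvCollectA_prefix _ _ hn1, he3, pvCollectA_prefix _ _ hn3]
  simp [PySem.List.pyGet?, PySem.List.pyIdx?]
  refine ⟨?_, ?_, ?_⟩ <;>
    · rw [if_pos (by omega)]
      simp
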